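-- pv_equiv track=rewrite | github.com/daniel-reich/turbo-robot | WsGjnhMdjsvzyuk5q_22.py | dashed
-- ===== SOURCE A (Python) =====
-- def dashed(txt):
--   vows = "aeiouAEIOU"
--   arr = []
--   for c in txt:
--     if c in vows:
--       arr.append("-{0}-".format(c))
--     else : arr.append(c)
--   return "".join(arr)
-- ===== SOURCE B (Python) =====
-- import re
--
-- def dashed(txt):
--   return re.sub(r'[aeiouAEIOU]', r'-\g<0>-', txt)
-- ===== Notes on version B (the rewrite author's own statement) =====
-- stated objective: idiomatic
-- what changed: The explicit per-character loop with a list accumulator and join is replaced by a single regex substitution that lets the regex engine do the traversal and per-match wrapping.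
import Mathlib
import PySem

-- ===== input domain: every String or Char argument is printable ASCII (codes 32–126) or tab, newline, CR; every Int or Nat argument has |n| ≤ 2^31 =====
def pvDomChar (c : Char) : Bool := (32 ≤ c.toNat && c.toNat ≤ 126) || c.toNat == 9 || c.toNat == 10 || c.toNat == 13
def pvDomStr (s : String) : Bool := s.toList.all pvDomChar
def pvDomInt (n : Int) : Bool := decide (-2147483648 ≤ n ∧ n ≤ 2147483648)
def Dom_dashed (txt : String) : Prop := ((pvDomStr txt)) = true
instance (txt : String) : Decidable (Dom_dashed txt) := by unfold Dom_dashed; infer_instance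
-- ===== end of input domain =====

-- B replaces the explicit loop + list accumulator + join with a single regex substitution (idiomatic, same cost).


-- ===== PORT A =====
-- literal port: membership test against the vowel string, list of pieces accumulated, then "".join
def dashed (txt : String) : String :=
  let vows := "aeiouAEIOU"
  let arr := txt.toList.foldl (fun arr c =>
    if vows.toList.contains c then arr ++ [String.ofList ['-', c, '-']]
    else arr ++ [String.ofList [c]]) []
  PySem.Str.join "" arr

-- ===== PORT B =====
-- port of re.sub(r'[aeiouAEIOU]', r'-\g<0>-', txt): for THIS pattern (a single-character class)
-- the regex engine replaces each matching character independently, which is exactly this flatMap;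
-- the port is exact on all strings.
def dashed_alt (txt : String) : String :=
  String.ofList (txt.toList.flatMap fun c =>
    if c ∈ ['a','e','i','o','u','A','E','I','O','U'] then ['-', c, '-'] else [c])

-- ===== PRECONDITION & SPEC =====
def Spec_dashed (txt : String) (out : String) : Prop := out = dashed_alt txt
instance (txt : String) (out : String) : Decidable (Spec_dashed txt out) := by unfold Spec_dashed; infer_instance

-- ===== CLAIM (what is proved, stated in full; the proofs are below) =====
def Claim_equal_dashed : Prop := ∀ (txt : String), Dom_dashed txt → Spec_dashed txt (dashed txt)

-- ===== LEMMAS AND PROOFS =====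

-- "".join is concatenation
theorem join_nil_eq_flatten (ps : List (List Char)) :
    PySem.Chars.join [] ps = ps.flatten := by
  induction ps with
  | nil => simp [PySem.Chars.join_nil]
  | cons p rest ih =>
    cases rest with
    | nil => simp [PySem.Chars.join_singleton]
    | cons q rest' =>
      rw [PySem.Chars.join_cons_cons]
      simp only [List.flatten_cons] at ih ⊢
      rw [ih]
      simp

-- the accumulator loop of A, flattened, is B's flatMap
theorem dashed_foldl_flat (l : List Char) (acc : List String) :
    ((l.foldl (fun arr c =>
        if "aeiouAEIOU".toList.contains c then arr ++ [String.ofList ['-', c, '-']]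
        else arr ++ [String.ofList [c]]) acc).map String.toList).flatten
    = (acc.map String.toList).flatten ++ (l.flatMap fun c =>
        if c ∈ ['a','e','i','o','u','A','E','I','O','U'] then ['-', c, '-'] else [c]) := by
  induction l generalizing acc with
  | nil => simp
  | cons c rest ih =>
    have hv : "aeiouAEIOU".toList = ['a','e','i','o','u','A','E','I','O','U'] := by decide
    simp only [List.foldl_cons, List.flatMap_cons]
    rw [ih]
    rw [hv]
    by_cases hc : c ∈ ['a','e','i','o','u','A','E','I','O','U'] <;>
      simp [hc, List.contains_eq_mem]

-- ===== VERDICT =====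
theorem dashed_spec : Claim_equal_dashed := by
  intro txt _
  unfold Spec_dashed dashed dashed_alt
  have h := dashed_foldl_flat txt.toList []
  have h2 : (PySem.Str.join ""
      (txt.toList.foldl (fun arr c =>
        if "aeiouAEIOU".toList.contains c then arr ++ [String.ofList ['-', c, '-']]
        else arr ++ [String.ofList [c]]) [])).toList
      = (txt.toList.flatMap fun c =>
          if c ∈ ['a','e','i','o','u','A','E','I','O','U'] then ['-', c, '-'] else [c]) := by
    have h0 : ("" : String).toList = [] := by decide
    rw [PySem.Str.toList_join, h0, join_nil_eq_flatten]
    simpa using h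
  have h3 := congrArg String.ofList h2
  simpa using h3
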